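-- pv_equiv track=rewrite | github.com/Ibrahem-Ali-99/VocalMind | infra/scripts/eval_emotion.py | _event_indexes
-- ===== SOURCE A (Python) =====
-- def _event_indexes(labels: list[str]) -> set[int]:
--     output: set[int] = set()
--     previous = None
--     for idx, label in enumerate(labels):
--         if previous is None:
--             previous = label
--             continue
--         if label != previous:
--             output.add(idx)
--             previous = label
--     return output
-- ===== SOURCE B (Python) =====
-- def _event_indexes(labels: list[str]) -> set[int]:
--     # Phase 1: run-length encode the labels into (label, length) pairs.
--     runs: list[tuple[str, int]] = []
--     for lab in labels:
--         if runs and runs[-1][0] == lab: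
--             runs[-1] = (lab, runs[-1][1] + 1)
--         else:
--             runs.append((lab, 1))
--     # Phase 2: change points are the cumulative starts of every run after the first.
--     output: set[int] = set()
--     pos = 0
--     for j, (_, n) in enumerate(runs):
--         if j > 0:
--             output.add(pos)
--         pos += n
--     return output
-- ===== Notes on version B (the rewrite author's own statement) =====
-- stated objective: alternative
-- what changed: Replaces A's single pass with a previous-label sentinel by a two-phase run-length decomposition: a recursive run-length encoding of the labels, then change-point indices derived as cumulative run starts.
import Mathlib
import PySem

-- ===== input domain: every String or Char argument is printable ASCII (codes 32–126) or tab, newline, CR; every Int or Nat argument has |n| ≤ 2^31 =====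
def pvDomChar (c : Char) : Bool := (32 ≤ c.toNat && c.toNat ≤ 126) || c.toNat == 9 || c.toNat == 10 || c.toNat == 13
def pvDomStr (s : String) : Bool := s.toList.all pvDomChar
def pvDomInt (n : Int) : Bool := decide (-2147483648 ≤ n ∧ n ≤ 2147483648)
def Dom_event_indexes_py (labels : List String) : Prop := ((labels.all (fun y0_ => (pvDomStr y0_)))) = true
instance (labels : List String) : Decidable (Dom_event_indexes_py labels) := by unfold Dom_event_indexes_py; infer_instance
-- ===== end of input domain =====

-- B replaces A's previous-label sentinel scan by a run-length encoding pass plus cumulative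
-- run starts (objective: alternative decomposition, same cost; return value only — neither mutates).

-- ===== PORT A =====
-- A: one pass with a `previous` sentinel, adding the index on each label change.
def event_indexes_py (labels : List String) : List Int :=
  ((PySem.List.enumerate labels 0).foldl
    (fun (st : PySem.Set Int × Option String) p =>
      match st.2 with
      | none => (st.1, some p.2)
      | some prev => if p.2 ≠ prev then (PySem.Set.add st.1 p.1, some p.2) else st)
    (PySem.Set.empty, none)).1

-- ===== PORT B =====
-- one step of Source B's phase 1: extend the last run (runs[-1] = (lab, n+1)) or append a new run
def pvStepB (runs : List (String × Int)) (lab : String) : List (String × Int) :=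
  match runs.getLast? with
  | some last => if last.1 = lab then runs.dropLast ++ [(lab, last.2 + 1)] else runs ++ [(lab, 1)]
  | none => runs ++ [(lab, 1)]

-- phase 1: run-length encode; phase 2: cumulative starts of every run after the first
def event_indexes_py_alt (labels : List String) : List Int :=
  let runs := labels.foldl pvStepB []
  ((PySem.List.enumerate runs 0).foldl
    (fun (st : PySem.Set Int × Int) q =>
      let st1 := if q.1 > 0 then (PySem.Set.add st.1 st.2, st.2) else st
      (st1.1, st1.2 + q.2.2))
    (PySem.Set.empty, 0)).1

-- ===== PRECONDITION & SPEC =====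
def Spec_event_indexes_py (labels : List String) (out : List Int) : Prop := out = event_indexes_py_alt labels
instance (labels : List String) (out : List Int) : Decidable (Spec_event_indexes_py labels out) := by unfold Spec_event_indexes_py; infer_instance

-- ===== CLAIM (what is proved, stated in full; the proofs are below) =====
def Claim_equal_event_indexes_py : Prop := ∀ (labels : List String), Dom_event_indexes_py labels → Spec_event_indexes_py labels (event_indexes_py labels)

-- ===== LEMMAS AND PROOFS =====

-- the change indices of xs after a previous label `prev`, starting at index i
def pvChg (prev : String) (i : Int) : List String → List Int
  | [] => []
  | b :: xs => if b ≠ prev then i :: pvChg b (i + 1) xs else pvChg prev (i + 1) xs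

-- cumulative starts: [p, p+n₁, p+n₁+n₂, …] (one entry per run length)
def pvCums (p : Int) : List Int → List Int
  | [] => []
  | n :: ns => p :: pvCums (p + n) ns

-- run-length encoding of xs given an open run of label l with count n (recursive model of phase 1)
def pvRle (l : String) (n : Int) : List String → List (String × Int)
  | [] => [(l, n)]
  | b :: xs => if b = l then pvRle l (n + 1) xs else (l, n) :: pvRle b 1 xs

theorem pvSet_add_append (o : PySem.Set Int) (x : Int) (h : x ∉ o) :
    PySem.Set.add o x = o ++ [x] := by
  simp [PySem.Set.add, PySem.Set.contains, h]

theorem pvRle_ne_nil (xs : List String) : ∀ (l : String) (n : Int), pvRle l n xs ≠ [] := by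
  induction xs with
  | nil => intro l n; simp [pvRle]
  | cons b xs ih =>
    intro l n
    simp only [pvRle]
    split
    · exact ih l (n + 1)
    · simp

theorem pvRle_pos (xs : List String) : ∀ (l : String) (n : Int), 0 < n →
    ∀ r ∈ pvRle l n xs, 0 < r.2 := by
  induction xs with
  | nil => intro l n hn r hr; simp [pvRle] at hr; simp [hr, hn]
  | cons b xs ih =>
    intro l n hn r hr
    simp only [pvRle] at hr
    split at hr
    · exact ih l (n + 1) (by omega) r hr
    · rw [List.mem_cons] at hr
      rcases hr with h | h
      · simp [h]; omega
      · exact ih b 1 (by omega) r h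

-- Source B's phase-1 loop, continued from a state whose last run is (l, n), produces pvRle
theorem pvFoldRle (xs : List String) : ∀ (pre : List (String × Int)) (l : String) (n : Int),
    xs.foldl pvStepB (pre ++ [(l, n)]) = pre ++ pvRle l n xs := by
  induction xs with
  | nil => intro pre l n; simp [pvRle]
  | cons b xs ih =>
    intro pre l n
    simp only [List.foldl_cons]
    by_cases hb : b = l
    · rw [show pvStepB (pre ++ [(l, n)]) b = pre ++ [(b, n + 1)] from by
        simp [pvStepB, hb]]
      rw [ih pre b (n + 1)]
      simp [pvRle, hb]
    · have hb' : ¬ l = b := fun h => hb h.symm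
      rw [show pvStepB (pre ++ [(l, n)]) b = (pre ++ [(l, n)]) ++ [(b, 1)] from by
        simp [pvStepB, hb']]
      rw [ih (pre ++ [(l, n)]) b 1]
      simp [pvRle, hb]

-- A's fold, after the first element, appends exactly the change indices
theorem pvFoldA (xs : List String) : ∀ (prev : String) (o : List Int) (i : Int),
    (∀ a ∈ o, a < i) →
    ((PySem.List.enumerate xs i).foldl
      (fun (st : PySem.Set Int × Option String) p =>
        match st.2 with
        | none => (st.1, some p.2)
        | some prev => if p.2 ≠ prev then (PySem.Set.add st.1 p.1, some p.2) else st)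
      (o, some prev)).1 = o ++ pvChg prev i xs := by
  induction xs with
  | nil => intro prev o i _; simp [PySem.List.enumerate, pvChg]
  | cons b xs ih =>
    intro prev o i ho
    rw [PySem.List.enumerate_cons]
    by_cases hb : b = prev
    · simp only [List.foldl_cons, pvChg, hb]
      simp only [ne_eq, not_true_eq_false, if_false]
      rw [ih prev o (i + 1) (fun a ha => by have := ho a ha; omega)]
    · simp only [List.foldl_cons, pvChg]
      simp only [ne_eq, hb, not_false_iff, if_true]
      have hnm : i ∉ o := fun h => by have := ho i h; omega
      rw [pvSet_add_append o i hnm]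
      rw [ih b (o ++ [i]) (i + 1) (by intro a ha; rcases List.mem_append.1 ha with h | h
                                      · have := ho a h; omega
                                      · simp at h; omega)]
      simp

-- B's phase-2 fold over the enumerated runs appends exactly the cumulative starts
theorem pvFoldB (rs : List (String × Int)) : ∀ (j : Int) (o : List Int) (p : Int),
    1 ≤ j → (∀ a ∈ o, a < p) → (∀ r ∈ rs, 0 < r.2) →
    ((PySem.List.enumerate rs j).foldl
      (fun (st : PySem.Set Int × Int) q =>
        let st1 := if q.1 > 0 then (PySem.Set.add st.1 st.2, st.2) else st
        (st1.1, st1.2 + q.2.2))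
      (o, p)).1 = o ++ pvCums p (rs.map (·.2)) := by
  induction rs with
  | nil => intro j o p _ _ _; simp [PySem.List.enumerate, pvCums]
  | cons r rs ih =>
    intro j o p hj ho hpos
    rw [PySem.List.enumerate_cons]
    simp only [List.foldl_cons]
    have hjpos : j > 0 := hj
    simp only [hjpos, if_true]
    have hnm : p ∉ o := fun h => by have := ho p h; omega
    rw [pvSet_add_append o p hnm]
    have hn : 0 < r.2 := hpos r (by simp)
    rw [ih (j + 1) (o ++ [p]) (p + r.2) (by omega)
        (by intro a ha; rcases List.mem_append.1 ha with h | h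
            · have := ho a h; omega
            · simp at h; omega)
        (fun m hm => hpos m (by simp [hm]))]
    simp [pvCums]

-- the change indices of xs continuing a run of l with count n at index i are the cumulative run starts
theorem pvChg_rle : ∀ (xs : List String) (l : String) (n i : Int),
    pvChg l i xs =
      pvCums (i - n + ((pvRle l n xs).headD (l, 0)).2) (((pvRle l n xs).tail).map (·.2)) := by
  intro xs
  induction xs with
  | nil => intro l n i; simp [pvChg, pvRle, pvCums]
  | cons b xs ih =>
    intro l n i
    by_cases hb : b = l
    · subst hb
      simp only [pvChg, pvRle, ne_eq, not_true_eq_false, if_false]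
      rw [ih b (n + 1) (i + 1)]
      have h1 : i + 1 - (n + 1) = i - n := by ring
      rw [h1]
      simp
    · simp only [pvChg, pvRle, ne_eq, hb, not_false_iff, if_true]
      obtain ⟨r0, t, ht⟩ := List.exists_cons_of_ne_nil (pvRle_ne_nil xs b 1)
      rw [ih b 1 (i + 1), ht]
      have h1 : i - n + n = i := by ring
      have h2 : i + 1 - 1 + r0.2 = i + r0.2 := by ring
      simp only [if_false, List.headD_cons, List.tail_cons, List.map_cons, pvCums, h1, h2]

theorem pv_main (labels : List String) :
    event_indexes_py labels = event_indexes_py_alt labels := by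
  unfold event_indexes_py event_indexes_py_alt
  cases labels with
  | nil => rfl
  | cons x xs =>
    simp only [List.foldl_cons]
    rw [show pvStepB [] x = [] ++ [(x, 1)] from rfl]
    rw [pvFoldRle xs [] x 1]
    simp only [List.nil_append]
    obtain ⟨r0, t, ht⟩ := List.exists_cons_of_ne_nil (pvRle_ne_nil xs x 1)
    rw [ht, PySem.List.enumerate_cons, PySem.List.enumerate_cons]
    simp only [List.foldl_cons]
    rw [show (0:Int) + 1 = 1 from rfl]
    have hA := pvFoldA xs x PySem.Set.empty 1 (by simp [PySem.Set.empty])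
    have hB := pvFoldB t 1 PySem.Set.empty ((0:Int) + r0.2) (le_refl 1)
      (by simp [PySem.Set.empty])
      (by intro m hm
          exact pvRle_pos xs x 1 (by omega) m (by rw [ht]; exact List.mem_cons_of_mem _ hm))
    simp only [PySem.Set.empty] at hA hB ⊢
    rw [hA]
    have hz : ¬ ((0:Int) > 0) := by norm_num
    simp only [hz, if_false]
    rw [hB]
    have hc := pvChg_rle xs x 1 1
    rw [ht] at hc
    simp only [List.headD_cons, List.tail_cons] at hc
    rw [hc]
    norm_num

-- ===== VERDICT (by name: the statement is the Claim_ definition above) =====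
theorem event_indexes_py_spec : Claim_equal_event_indexes_py := by
  intro labels _
  unfold Spec_event_indexes_py
  exact pv_main labels
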